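-- pv_equiv track=rewrite | github.com/anetczuk/ReverseCRC | src/fastcrc/ctypes/fastcrc.py | convert_to_msb_list
-- ===== SOURCE A (Python) =====
-- def convert_to_msb_list( number, numberBytesSize ):
--     retList = []
--     for _ in range(numberBytesSize):
--         byte = number & 0xFF
--         retList.append( byte )
--         number = number >> 8
--     ## appending and list reverse is faster than inserting at front of list
--     retList.reverse()
--     return retList
-- ===== SOURCE B (Python) =====
-- def convert_to_msb_list(number, numberBytesSize):
--     return [(number >> (8 * i)) & 0xFF for i in range(numberBytesSize - 1, -1, -1)]
-- ===== Notes on version B (the rewrite author's own statement) =====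
-- stated objective: simpler
-- what changed: Builds the bytes directly in MSB order via a comprehension over descending absolute shifts, dropping A's running accumulator and final reverse.
import Mathlib
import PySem

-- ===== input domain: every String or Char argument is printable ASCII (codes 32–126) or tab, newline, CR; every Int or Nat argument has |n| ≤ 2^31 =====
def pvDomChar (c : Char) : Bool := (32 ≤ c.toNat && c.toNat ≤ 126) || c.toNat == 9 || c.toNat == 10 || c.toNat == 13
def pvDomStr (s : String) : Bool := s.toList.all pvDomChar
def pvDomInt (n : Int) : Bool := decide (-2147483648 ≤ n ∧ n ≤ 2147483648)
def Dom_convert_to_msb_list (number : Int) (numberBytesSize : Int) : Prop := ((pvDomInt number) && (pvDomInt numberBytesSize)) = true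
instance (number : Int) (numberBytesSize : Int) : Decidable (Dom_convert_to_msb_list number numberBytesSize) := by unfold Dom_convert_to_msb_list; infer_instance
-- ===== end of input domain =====

-- B builds the bytes directly in MSB order from absolute shifts (number >> 8*i), dropping A's
-- running accumulator and final reverse; objective: simpler, same O(n) cost.


-- ===== PORT A =====
-- Port of A: fold over range(numberBytesSize) carrying (retList, number), then reverse.
def convert_to_msb_list (number : Int) (numberBytesSize : Int) : List Int :=
  ((PySem.List.pyRange 0 numberBytesSize 1).foldl
      (fun (st : List Int × Int) _ => (st.1 ++ [PySem.Int.band st.2 255], st.2 >>> 8))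
      ([], number)).1.reverse

-- ===== PORT B =====
-- Port of B: comprehension over range(numberBytesSize-1, -1, -1) of absolute shifts.
def convert_to_msb_list_alt (number : Int) (numberBytesSize : Int) : List Int :=
  -- i ranges over range(numberBytesSize-1, -1, -1), so i ≥ 0 and .toNat is exact
  (PySem.List.pyRange (numberBytesSize - 1) (-1) (-1)).map
    (fun i => PySem.Int.band (number >>> (8 * i).toNat) 255)

-- ===== PRECONDITION & SPEC =====
def Spec_convert_to_msb_list (number : Int) (numberBytesSize : Int) (out : List Int) : Prop := out = convert_to_msb_list_alt number numberBytesSize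
instance (number : Int) (numberBytesSize : Int) (out : List Int) : Decidable (Spec_convert_to_msb_list number numberBytesSize out) := by unfold Spec_convert_to_msb_list; infer_instance

-- ===== CLAIM (what is proved, stated in full; the proofs are below) =====
def Claim_equal_convert_to_msb_list : Prop := ∀ (number : Int) (numberBytesSize : Int), Dom_convert_to_msb_list number numberBytesSize → Spec_convert_to_msb_list number numberBytesSize (convert_to_msb_list number numberBytesSize)

-- ===== LEMMAS AND PROOFS =====

-- A's loop over any index list of length n builds acc ++ the ascending byte list of x.
theorem pvLoopA (l : List Int) (acc : List Int) (x : Int) :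
    (l.foldl (fun (st : List Int × Int) _ => (st.1 ++ [PySem.Int.band st.2 255], st.2 >>> 8)) (acc, x)).1
      = acc ++ (List.range l.length).map (fun i => PySem.Int.band (x >>> (8 * i : Nat)) 255) := by
  induction l generalizing acc x with
  | nil => simp
  | cons h t ih =>
      simp only [List.foldl_cons, ih, List.length_cons, List.range_succ_eq_map]
      have hsh : ∀ i : Nat, (x >>> (8 : Int)) >>> (8 * i : Nat) = x >>> (8 * (i + 1) : Nat) := by
        intro i
        have h8 : (8 : Int) = ((8 : Nat) : Int) := by norm_num
        rw [h8, Int.shiftRight_natCast_right, ← Int.shiftRight_add]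
        congr 1
        ring
      simp only [List.map_cons, List.map_map, Function.comp_def, hsh]
      simp [List.append_assoc]

-- ===== VERDICT (by name: the statement is the Claim_ definition above) =====
theorem convert_to_msb_list_spec : Claim_equal_convert_to_msb_list := by
  intro number numberBytesSize _
  show convert_to_msb_list number numberBytesSize = convert_to_msb_list_alt number numberBytesSize
  unfold convert_to_msb_list convert_to_msb_list_alt
  rw [PySem.List.pyRange_neg_one_eq_reverse]
  have hb : numberBytesSize - 1 + 1 = numberBytesSize := by ring
  rw [hb, List.map_reverse, pvLoopA]
  simp only [List.nil_append, PySem.List.pyRange_one, List.map_map, List.length_map,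
    List.length_range, Function.comp_def]
  congr 1
  apply List.map_congr_left
  intro i _
  have h : ((8 : Int) * (-1 + 1 + (i : Int))).toNat = 8 * i := by omega
  rw [h, Int.shiftRight_natCast_right]
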